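-- pv_equiv track=rewrite | github.com/loopsleasing-png/quantum-cracker | src/quantum_cracker/parity/ec_constraints.py | _small_factors
-- ===== SOURCE A (Python) =====
-- def _small_factors(n: int) -> list[int]:
--     """Find small prime factors of n."""
--     factors = []
--     d = 2
--     temp = n
--     while d * d <= temp and d < 100000:
--         if temp % d == 0:
--             factors.append(d)
--             while temp % d == 0:
--                 temp //= d
--         d += 1
--     if temp > 1:
--         factors.append(temp)
--     return factors
-- ===== SOURCE B (Python) =====
-- _LIMIT = 100000
--
--
-- def _sieve_primes(limit):
--     """Sieve of Eratosthenes: all primes below limit, in increasing order."""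
--     composite = bytearray(limit)
--     for p in range(2, limit):
--         if not composite[p]:
--             for m in range(p * p, limit, p):
--                 composite[m] = 1
--     return [p for p in range(2, limit) if not composite[p]]
--
--
-- _PRIMES = _sieve_primes(_LIMIT)
--
--
-- def _small_factors(n: int) -> list[int]:
--     """Find small prime factors of n by scanning a precomputed prime table."""
--     factors = []
--     temp = n
--     for p in _PRIMES:
--         if p * p > temp:
--             break
--         if temp % p == 0:
--             factors.append(p)
--             while temp % p == 0:
--                 temp //= p
--     if temp > 1:
--         factors.append(temp)
--     return factors
-- ===== Notes on version B (the rewrite author's own statement) =====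
-- stated objective: alternative
-- what changed: B precomputes the primes below 100000 once with a Sieve of Eratosthenes (bytearray marking pass plus a collection pass) and trial-divides n only by entries of that prime table, instead of A's loop that tests every integer d = 2, 3, 4, ... as a divisor; composite candidates A tests can never divide the running cofactor, so the results coincide.
import Mathlib
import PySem

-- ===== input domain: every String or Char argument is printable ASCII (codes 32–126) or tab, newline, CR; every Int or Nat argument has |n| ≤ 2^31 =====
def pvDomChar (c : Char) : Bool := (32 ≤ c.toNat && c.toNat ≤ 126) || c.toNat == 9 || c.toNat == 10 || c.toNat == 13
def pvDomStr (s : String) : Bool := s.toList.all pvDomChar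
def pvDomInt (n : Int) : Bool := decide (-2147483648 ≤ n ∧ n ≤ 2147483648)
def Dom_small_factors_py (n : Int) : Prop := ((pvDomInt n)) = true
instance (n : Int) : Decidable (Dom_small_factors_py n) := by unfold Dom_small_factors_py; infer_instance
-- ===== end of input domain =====

-- B replaces A's per-integer trial loop by a precomputed Sieve-of-Eratosthenes table of
-- the primes below 100000 and scans only that table (alternative data structure, same results).


-- ===== PORT A =====
-- inner 'while temp % d == 0: temp //= d' (shared verbatim by both Pythons), with a fuel
-- counter making the recursion structural; the 0 < temp / 2 ≤ d guards only make the loop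
-- total — they hold whenever the Python loop body runs (temp ≥ d*d ≥ 4 there)
def pvDivOutF : Nat → Int → Int → Int
  | 0, temp, _ => temp
  | fuel + 1, temp, d =>
    if PySem.Int.mod temp d = 0 ∧ 0 < temp ∧ 2 ≤ d then
      pvDivOutF fuel (PySem.Int.floordiv temp d) d
    else temp

-- temp.toNat + 1 rounds of fuel always suffice (temp shrinks every round; pvDivOut_step below)
def pvDivOut (temp d : Int) : Int := pvDivOutF (temp.toNat + 1) temp d

-- A's outer while loop over every candidate d, fuel-counted (d rises to at most 100000
-- from 2, so 100000 rounds of fuel always suffice): returns (factors-so-far, final temp)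
def pvLoopAF : Nat → Int → Int → List Int × Int
  | 0, temp, _ => ([], temp)
  | fuel + 1, temp, d =>
    if d * d ≤ temp ∧ d < 100000 then
      if PySem.Int.mod temp d = 0 then
        let r := pvLoopAF fuel (pvDivOut temp d) (d + 1)
        (d :: r.1, r.2)
      else pvLoopAF fuel temp (d + 1)
    else ([], temp)

def small_factors_py (n : Int) : List Int :=
  let r := pvLoopAF 100000 n 2
  r.1 ++ (if r.2 > 1 then [r.2] else [])

-- ===== PORT B =====
-- 'for m in range(p*p, limit, p): composite[m] = 1'  (bytearray → Array Bool)
def pvMark (comp : Array Bool) (p : Int) : Array Bool :=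
  (PySem.List.pyRange (p * p) 100000 p).foldl (fun a m => a.setIfInBounds m.toNat true) comp

-- the marking pass of _sieve_primes (limit = 100000)
def pvSieve : Array Bool :=
  (PySem.List.pyRange 2 100000 1).foldl
    (fun a p => if (a[p.toNat]?).getD false = true then a else pvMark a p)
    (Array.replicate 100000 false)

-- '[p for p in range(2, limit) if not composite[p]]'
def pvPrimes : List Int :=
  (PySem.List.pyRange 2 100000 1).filter (fun p => !((pvSieve[p.toNat]?).getD false))

-- B's 'for p in _PRIMES' loop with its break: returns (factors-so-far, final temp)
def pvLoopB : Int → List Int → List Int × Int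
  | temp, [] => ([], temp)
  | temp, p :: ps =>
    if p * p > temp then ([], temp)
    else if PySem.Int.mod temp p = 0 then
      let r := pvLoopB (pvDivOut temp p) ps
      (p :: r.1, r.2)
    else pvLoopB temp ps

def small_factors_py_alt (n : Int) : List Int :=
  let r := pvLoopB n pvPrimes
  r.1 ++ (if r.2 > 1 then [r.2] else [])

-- ===== PRECONDITION & SPEC =====
def Spec_small_factors_py (n : Int) (out : List Int) : Prop := out = small_factors_py_alt n
instance (n : Int) (out : List Int) : Decidable (Spec_small_factors_py n out) := by unfold Spec_small_factors_py; infer_instance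

-- ===== CLAIM =====
def Claim_equal_small_factors_py : Prop := ∀ (n : Int), Dom_small_factors_py n → Spec_small_factors_py n (small_factors_py n)

-- ===== LEMMAS AND PROOFS =====

-- q ≥ 2 has no divisor strictly between 1 and itself (i.e. q is prime); the only
-- property of the sieve the equivalence needs is that its table keeps all such q < 100000
def NoSmallDiv (q : Int) : Prop := 2 ≤ q ∧ ∀ e : Int, 2 ≤ e → e < q → ¬ e ∣ q

theorem pvDivOutF_succ (f : Nat) (temp d : Int) :
    pvDivOutF (f + 1) temp d =
      if PySem.Int.mod temp d = 0 ∧ 0 < temp ∧ 2 ≤ d then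
        pvDivOutF f (PySem.Int.floordiv temp d) d
      else temp := rfl

theorem pvLoopAF_succ (f : Nat) (temp d : Int) :
    pvLoopAF (f + 1) temp d =
      if d * d ≤ temp ∧ d < 100000 then
        if PySem.Int.mod temp d = 0 then
          let r := pvLoopAF f (pvDivOut temp d) (d + 1)
          (d :: r.1, r.2)
        else pvLoopAF f temp (d + 1)
      else ([], temp) := rfl

theorem pv_div_lt (temp d : Int) (ht : 0 < temp) (hd : 2 ≤ d) : temp / d < temp := by
  have h2 : temp / d * d ≤ temp := Int.ediv_mul_le temp (by omega)
  have h3 : 0 ≤ temp / d := Int.ediv_nonneg (by omega) (by omega)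
  nlinarith

-- any fuel above temp.toNat computes the same value (the loop stops by itself first)
theorem pvDivOutF_fuel : ∀ (f g : Nat) (temp d : Int), temp.toNat < f → temp.toNat < g →
    pvDivOutF f temp d = pvDivOutF g temp d := by
  intro f
  induction f with
  | zero => omega
  | succ f ihf =>
    intro g temp d hf hg
    obtain ⟨g', rfl⟩ : ∃ g', g = g' + 1 := ⟨g - 1, by omega⟩
    rw [pvDivOutF_succ, pvDivOutF_succ]
    split_ifs with h
    · obtain ⟨hm, ht, hd⟩ := h
      have hdvd : d ∣ temp := (PySem.Int.mod_eq_zero_iff_dvd temp d).mp hm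
      rw [PySem.Int.floordiv_eq_ediv_of_pos (by omega)]
      have hlt := pv_div_lt temp d ht hd
      have hnn : 0 ≤ temp / d := Int.ediv_nonneg (by omega) (by omega)
      exact ihf g' (temp / d) d (by omega) (by omega)
    · rfl

-- the defining fixpoint equation of the inner while loop
theorem pvDivOut_step (temp d : Int) :
    pvDivOut temp d =
      if PySem.Int.mod temp d = 0 ∧ 0 < temp ∧ 2 ≤ d then
        pvDivOut (PySem.Int.floordiv temp d) d
      else temp := by
  conv_lhs => rw [pvDivOut, pvDivOutF_succ]
  by_cases h : PySem.Int.mod temp d = 0 ∧ 0 < temp ∧ 2 ≤ d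
  · rw [if_pos h, if_pos h]
    obtain ⟨hm, ht, hd⟩ := h
    have hdvd : d ∣ temp := (PySem.Int.mod_eq_zero_iff_dvd temp d).mp hm
    unfold pvDivOut
    have hlt : PySem.Int.floordiv temp d < temp := by
      rw [PySem.Int.floordiv_eq_ediv_of_pos (by omega)]
      exact pv_div_lt temp d ht hd
    have hnn : 0 ≤ PySem.Int.floordiv temp d := by
      rw [PySem.Int.floordiv_eq_ediv_of_pos (by omega)]
      exact Int.ediv_nonneg (by omega) (by omega)
    exact pvDivOutF_fuel temp.toNat ((PySem.Int.floordiv temp d).toNat + 1)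
      (PySem.Int.floordiv temp d) d (by omega) (by omega)
  · rw [if_neg h, if_neg h]

theorem pvDivOut_pos_aux : ∀ (k : Nat) (temp d : Int), temp.toNat = k → 0 < temp → 2 ≤ d →
    0 < pvDivOut temp d := by
  intro k
  induction k using Nat.strong_induction_on with
  | _ k ih =>
    intro temp d hk ht hd
    rw [pvDivOut_step]
    split_ifs with h
    · have hdvd : d ∣ temp := (PySem.Int.mod_eq_zero_iff_dvd temp d).mp h.1
      rw [PySem.Int.floordiv_eq_ediv_of_pos (by omega)]
      have hpos : 0 < temp / d := Int.ediv_pos_of_pos_of_dvd ht (by omega) hdvd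
      have hlt := pv_div_lt temp d ht hd
      exact ih (temp / d).toNat (by omega) _ d rfl hpos hd
    · exact ht

theorem pvDivOut_pos (temp d : Int) (ht : 0 < temp) (hd : 2 ≤ d) : 0 < pvDivOut temp d :=
  pvDivOut_pos_aux temp.toNat temp d rfl ht hd

theorem pvDivOut_dvd_aux : ∀ (k : Nat) (temp d : Int), temp.toNat = k → 0 < temp → 2 ≤ d →
    pvDivOut temp d ∣ temp := by
  intro k
  induction k using Nat.strong_induction_on with
  | _ k ih =>
    intro temp d hk ht hd
    rw [pvDivOut_step]
    split_ifs with h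
    · have hdvd : d ∣ temp := (PySem.Int.mod_eq_zero_iff_dvd temp d).mp h.1
      rw [PySem.Int.floordiv_eq_ediv_of_pos (by omega)]
      have hpos : 0 < temp / d := Int.ediv_pos_of_pos_of_dvd ht (by omega) hdvd
      have hlt := pv_div_lt temp d ht hd
      exact dvd_trans (ih (temp / d).toNat (by omega) _ d rfl hpos hd)
        (Int.ediv_dvd_of_dvd hdvd)
    · exact dvd_refl temp

theorem pvDivOut_dvd (temp d : Int) (ht : 0 < temp) (hd : 2 ≤ d) : pvDivOut temp d ∣ temp :=
  pvDivOut_dvd_aux temp.toNat temp d rfl ht hd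

theorem pvDivOut_not_dvd_aux : ∀ (k : Nat) (temp d : Int), temp.toNat = k → 0 < temp → 2 ≤ d →
    ¬ d ∣ pvDivOut temp d := by
  intro k
  induction k using Nat.strong_induction_on with
  | _ k ih =>
    intro temp d hk ht hd
    rw [pvDivOut_step]
    split_ifs with h
    · have hdvd : d ∣ temp := (PySem.Int.mod_eq_zero_iff_dvd temp d).mp h.1
      rw [PySem.Int.floordiv_eq_ediv_of_pos (by omega)]
      have hpos : 0 < temp / d := Int.ediv_pos_of_pos_of_dvd ht (by omega) hdvd
      have hlt := pv_div_lt temp d ht hd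
      exact ih (temp / d).toNat (by omega) _ d rfl hpos hd
    · intro hdvd
      exact h ⟨(PySem.Int.mod_eq_zero_iff_dvd temp d).mpr hdvd, ht, hd⟩

theorem pvDivOut_not_dvd (temp d : Int) (ht : 0 < temp) (hd : 2 ≤ d) :
    ¬ d ∣ pvDivOut temp d :=
  pvDivOut_not_dvd_aux temp.toNat temp d rfl ht hd

-- a fold of setIfInBounds leaves untouched cells unchanged
theorem foldl_set_untouched (ms : List Int) (a : Array Bool) (i : Nat)
    (h : ∀ m ∈ ms, m.toNat ≠ i) :
    (((ms.foldl (fun a m => a.setIfInBounds m.toNat true) a)[i]?).getD false)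
      = ((a[i]?).getD false) := by
  induction ms generalizing a with
  | nil => rfl
  | cons m ms ih =>
    simp only [List.foldl_cons]
    rw [ih _ (fun x hx => h x (List.mem_cons_of_mem m hx))]
    have hne : m.toNat ≠ i := h m (List.mem_cons_self)
    simp [hne]

-- every index the inner marking loop writes is a proper multiple of p, never a NoSmallDiv number
theorem pvMark_keeps (a : Array Bool) (p q : Int) (hp : 2 ≤ p) (hq : NoSmallDiv q)
    (h : ((a[q.toNat]?).getD false) = false) :
    (((pvMark a p)[q.toNat]?).getD false) = false := by
  unfold pvMark
  rw [foldl_set_untouched _ _ _ ?_]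
  · exact h
  · intro m hm hmq
    rw [PySem.List.mem_pyRange_iff_of_pos (by omega : (0:Int) < p)] at hm
    obtain ⟨h1, h2, h3⟩ := hm
    obtain ⟨t, ht3⟩ := h3
    have hpm : p ∣ m := ⟨p + t, by linarith [mul_add p p t]⟩
    have hm4 : (4:Int) ≤ m := by nlinarith
    have hq2 := hq.1
    have hqm : q = m := by omega
    exact hq.2 p hp (by nlinarith) (by rw [hqm]; exact hpm)

-- the sieve never marks a NoSmallDiv number
theorem pvSieve_keeps (q : Int) (hq : NoSmallDiv q) :
    ((pvSieve[q.toNat]?).getD false) = false := by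
  unfold pvSieve
  have base : ∀ i : Nat, (((Array.replicate 100000 false)[i]?).getD false) = false := by
    intro i
    simp [Array.getElem?_replicate]
    split <;> simp
  have main : ∀ (cs : List Int) (a : Array Bool), (∀ c ∈ cs, 2 ≤ c) →
      (∀ r : Int, NoSmallDiv r → ((a[r.toNat]?).getD false) = false) →
      ∀ r : Int, NoSmallDiv r →
      (((cs.foldl (fun a p => if (a[p.toNat]?).getD false = true then a else pvMark a p) a)[r.toNat]?).getD false) = false := by
    intro cs
    induction cs with
    | nil => intro a _ ha r hr; exact ha r hr
    | cons c cs ih =>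
      intro a hcs ha r hr
      simp only [List.foldl_cons]
      by_cases hc : ((a[c.toNat]?).getD false) = true
      · rw [if_pos hc]
        exact ih a (fun x hx => hcs x (List.mem_cons_of_mem c hx)) ha r hr
      · rw [if_neg hc]
        refine ih _ (fun x hx => hcs x (List.mem_cons_of_mem c hx)) ?_ r hr
        intro s hs
        exact pvMark_keeps a c s (hcs c List.mem_cons_self) hs (ha s hs)
  refine main _ _ ?_ (fun r _ => base r.toNat) q hq
  intro c hc
  rw [PySem.List.mem_pyRange_one] at hc
  omega

theorem pvPrimes_sorted : List.Pairwise (· < ·) pvPrimes :=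
  List.Pairwise.filter _ (PySem.List.pairwise_lt_pyRange_one 2 100000)

theorem pvPrimes_bounds : ∀ p ∈ pvPrimes, 2 ≤ p ∧ p < 100000 := by
  intro p hp
  unfold pvPrimes at hp
  have := List.mem_of_mem_filter hp
  rw [PySem.List.mem_pyRange_one] at this
  exact this

theorem pvPrimes_complete (q : Int) (hq : NoSmallDiv q) (hlt : q < 100000) : q ∈ pvPrimes := by
  unfold pvPrimes
  rw [List.mem_filter]
  constructor
  · rw [PySem.List.mem_pyRange_one]
    exact ⟨hq.1, hlt⟩
  · simp [pvSieve_keeps q hq]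

-- the core correspondence: A's scan over every integer from d equals B's scan over any
-- sorted list L of candidates ≥ d below 100000 that contains all NoSmallDiv numbers there,
-- provided no integer in [2, d) still divides temp
theorem pvLoop_eq : ∀ (f : Nat) (temp d : Int) (L : List Int), (100000 - d).toNat < f →
    0 < temp → 2 ≤ d →
    (∀ e : Int, 2 ≤ e → e < d → ¬ e ∣ temp) →
    List.Pairwise (· < ·) L →
    (∀ p ∈ L, d ≤ p ∧ p < 100000) →
    (∀ q : Int, d ≤ q → q < 100000 → NoSmallDiv q → q ∈ L) →
    pvLoopAF f temp d = pvLoopB temp L := by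
  intro f
  induction f with
  | zero => intro temp d L hf; exact absurd hf (Nat.not_lt_zero _)
  | succ f ihf =>
    intro temp d L hf ht hd hinv hsort hbnd hcpl
    rw [pvLoopAF_succ]
    by_cases hg : d * d ≤ temp ∧ d < 100000
    · rw [if_pos hg]
      by_cases hns : NoSmallDiv d
      · -- d survives every divisor test below it: it is in L, and is L's head
        have hdL : d ∈ L := hcpl d le_rfl hg.2 hns
        obtain ⟨p, ps, rfl⟩ : ∃ p ps, L = p :: ps := by
          cases L with
          | nil => cases hdL
          | cons p ps => exact ⟨p, ps, rfl⟩
        have hpd : p = d := by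
          rcases List.mem_cons.mp hdL with h | h
          · omega
          · have := (List.pairwise_cons.mp hsort).1 d h
            have := (hbnd p List.mem_cons_self).1
            omega
        subst hpd
        have hbreak : ¬ p * p > temp := by omega
        have hps_bnd : ∀ x ∈ ps, p + 1 ≤ x ∧ x < 100000 := by
          intro x hx
          have := (List.pairwise_cons.mp hsort).1 x hx
          have := hbnd x (List.mem_cons_of_mem p hx)
          omega
        have hps_cpl : ∀ q : Int, p + 1 ≤ q → q < 100000 → NoSmallDiv q → q ∈ ps := by
          intro q h1 h2 h3
          rcases List.mem_cons.mp (hcpl q (by omega) h2 h3) with h | h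
          · omega
          · exact h
        have hps_sort := (List.pairwise_cons.mp hsort).2
        by_cases hm : PySem.Int.mod temp p = 0
        · rw [if_pos hm, pvLoopB, if_neg hbreak, if_pos hm]
          have hdvd : p ∣ temp := (PySem.Int.mod_eq_zero_iff_dvd temp p).mp hm
          have ht' : 0 < pvDivOut temp p := pvDivOut_pos temp p ht hd
          have hinv' : ∀ e : Int, 2 ≤ e → e < p + 1 → ¬ e ∣ pvDivOut temp p := by
            intro e he1 he2 hde
            rcases eq_or_lt_of_le (by omega : e ≤ p) with heq | hlt
            · exact pvDivOut_not_dvd temp p ht hd (heq ▸ hde)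
            · exact hinv e he1 hlt (dvd_trans hde (pvDivOut_dvd temp p ht hd))
          rw [ihf _ (p + 1) ps (by omega) ht' (by omega) hinv' hps_sort hps_bnd hps_cpl]
        · rw [if_neg hm, pvLoopB, if_neg hbreak, if_neg hm]
          have hinv' : ∀ e : Int, 2 ≤ e → e < p + 1 → ¬ e ∣ temp := by
            intro e he1 he2 hde
            rcases eq_or_lt_of_le (by omega : e ≤ p) with heq | hlt
            · rw [heq] at hde
              exact hm ((PySem.Int.mod_eq_zero_iff_dvd temp p).mpr hde)
            · exact hinv e he1 hlt hde
          exact ihf _ (p + 1) ps (by omega) ht (by omega) hinv' hps_sort hps_bnd hps_cpl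
      · -- d has a smaller divisor, hence cannot divide temp: both sides skip it
        obtain ⟨a, ha1, ha2, ha3⟩ : ∃ a : Int, 2 ≤ a ∧ a < d ∧ a ∣ d := by
          unfold NoSmallDiv at hns
          by_contra hno
          exact hns ⟨hd, fun e he1 he2 hed => hno ⟨e, he1, he2, hed⟩⟩
        have hnd : ¬ d ∣ temp := fun h => hinv a ha1 ha2 (dvd_trans ha3 h)
        have hm : ¬ PySem.Int.mod temp d = 0 := fun h =>
          hnd ((PySem.Int.mod_eq_zero_iff_dvd temp d).mp h)
        rw [if_neg hm]
        have hinv' : ∀ e : Int, 2 ≤ e → e < d + 1 → ¬ e ∣ temp := by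
          intro e he1 he2 hde
          rcases eq_or_lt_of_le (by omega : e ≤ d) with heq | hlt
          · exact hnd (heq ▸ hde)
          · exact hinv e he1 hlt hde
        cases L with
        | nil =>
          rw [show pvLoopB temp [] = ([], temp) from rfl]
          rw [ihf _ (d + 1) [] (by omega) ht (by omega)
            hinv' (by simp) (by simp) (fun q h1 h2 h3 => absurd (hcpl q (by omega) h2 h3) (by simp))]
          rfl
        | cons p ps =>
          have hpd : d ≤ p := (hbnd p List.mem_cons_self).1
          rcases eq_or_lt_of_le hpd with heq | hlt
          · -- L also lists d (a composite the sieve kept is harmless): B skips it too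
            subst heq
            have hbreak : ¬ d * d > temp := by omega
            rw [pvLoopB, if_neg hbreak, if_neg hm]
            refine ihf _ (d + 1) ps (by omega) ht (by omega)
              hinv' (List.pairwise_cons.mp hsort).2 ?_ ?_
            · intro x hx
              have := (List.pairwise_cons.mp hsort).1 x hx
              have := hbnd x (List.mem_cons_of_mem d hx)
              omega
            · intro q h1 h2 h3
              rcases List.mem_cons.mp (hcpl q (by omega) h2 h3) with h | h
              · omega
              · exact h
          · -- L starts beyond d: only A advances
            refine ihf _ (d + 1) (p :: ps) (by omega) ht (by omega)
              hinv' hsort ?_ (fun q h1 h2 h3 => hcpl q (by omega) h2 h3)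
            intro x hx
            have := hbnd x hx
            rcases List.mem_cons.mp hx with rfl | h
            · omega
            · have := (List.pairwise_cons.mp hsort).1 x h
              omega
    · -- A's guard fails; B's head (if any) is ≥ d, so its break fires at once
      rw [if_neg hg]
      cases L with
      | nil => rfl
      | cons p ps =>
        have h1 := hbnd p List.mem_cons_self
        rcases not_and_or.mp hg with hng | hng
        · have hdp : d * d ≤ p * p :=
            mul_le_mul h1.1 h1.1 (by omega) (by omega)
          have hbreak : p * p > temp := by omega
          rw [pvLoopB, if_pos hbreak]
        · omega

-- B's loop returns at once when temp < 4 (every table entry p has p*p ≥ 4)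
theorem pvLoopB_small (temp : Int) (L : List Int) (hL : ∀ p ∈ L, 2 ≤ p) (h : temp < 4) :
    pvLoopB temp L = ([], temp) := by
  cases L with
  | nil => rfl
  | cons p ps =>
    have := hL p List.mem_cons_self
    rw [pvLoopB, if_pos (by nlinarith)]

-- ===== VERDICT (by name: the statement is the Claim_ definition above) =====
theorem small_factors_py_spec : Claim_equal_small_factors_py := by
  intro n _
  unfold Spec_small_factors_py small_factors_py small_factors_py_alt
  by_cases h4 : n < 4
  · have hA : pvLoopAF 100000 n 2 = ([], n) := by
      rw [show (100000 : Nat) = 99999 + 1 by norm_num, pvLoopAF_succ]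
      rw [if_neg (by omega : ¬ ((2:Int) * 2 ≤ n ∧ (2:Int) < 100000))]
    rw [hA, pvLoopB_small n pvPrimes (fun p hp => (pvPrimes_bounds p hp).1) h4]
  · rw [pvLoop_eq 100000 n 2 pvPrimes (by decide) (by omega) (by omega)
      (by omega) pvPrimes_sorted (fun p hp => ⟨(pvPrimes_bounds p hp).1, (pvPrimes_bounds p hp).2⟩)
      (fun q _ h2 h3 => pvPrimes_complete q h3 h2)]
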